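-- pv_equiv track=rewrite | github.com/aflaviarm/ExecutivoCiclico | main.py | calcular_tempo_ciclo_primario_e_secundario
-- ===== SOURCE A (Python) =====
-- import math
--
-- def calcular_mmc(periodos):
--     """
--     Calcula o Mínimo Múltiplo Comum (MMC) de uma lista de períodos.
--
--     Parâmetros:
--         periodos (list): Uma lista de períodos das tarefas.
--
--     Retorna:
--         int: O Mínimo Múltiplo Comum (MMC) dos períodos.
--     """
--
--     def gcd(a, b):
--         """Calcula o Maior Divisor Comum (MDC) de dois números."""
--         while b:
--             a, b = b, a % b
--         return a
--
--     def lcm(a, b):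
--         """Calcula o Mínimo Múltiplo Comum (MMC) de dois números."""
--         return a * b // gcd(a, b)
--
--     mmc = 1
--     for periodo in periodos:
--         mmc = lcm(mmc, periodo)
--     return mmc
--
-- def calcular_mdc(periodos):
--     """
--     Calcula o Maior Divisor Comum (MDC) de uma lista de períodos.
--
--     Parâmetros:
--         periodos (list): Uma lista de períodos das tarefas.
--
--     Retorna:
--         int: O Maior Divisor Comum (MDC) dos períodos.
--     """
--     mdc = periodos[0]
--     for periodo in periodos[1:]:
--         mdc = math.gcd(mdc, periodo)
--     return mdc
--
-- def calcular_tempo_ciclo_primario_e_secundario(periodos, maiores_tempos_execucao):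
--     """
--     Calcula o tempo de ciclo primário e secundário com base nos períodos das tarefas.
--
--     Parâmetros:
--         periodos (list): Uma lista de períodos das tarefas.
--         maiores_tempos_execucao (list): Uma lista dos maiores tempos de execução das tarefas.
--
--     Retorna:
--         tuple: Uma tupla contendo o tempo de ciclo primário e o tempo de ciclo secundário.
--     """
--     mmc = calcular_mmc(periodos)
--     mdc = calcular_mdc(periodos)
--
--     # Requisito 1: O tamanho do frame deve ser maior ou igual ao maior tempo de execução de uma tarefa
--     tamanho_frame = max(maiores_tempos_execucao)
--
--     # Requisito 2: O tamanho de frames candidatos deve caber igualmente dentro de um ciclo maior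
--     tempo_ciclo_primario = mmc
--     tempo_ciclo_secundario = mdc
--
--     # Requisito 3: Deve existir um frame entre o release-time(t') e o deadline (t'+Di) de todos os jobs
--     while (2 * tamanho_frame - tempo_ciclo_primario) > tempo_ciclo_secundario:
--         tempo_ciclo_secundario += mdc
--
--     return tempo_ciclo_primario, tempo_ciclo_secundario
-- ===== SOURCE B (Python) =====
-- import math
--
-- def calcular_tempo_ciclo_primario_e_secundario(periodos, maiores_tempos_execucao):
--     # Closed form: the loop "sec += mdc until 2*frame - mmc <= sec" converges to
--     # mdc * max(1, ceil((2*frame - mmc) / mdc)); computed directly with ceiling division.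
--     mmc = math.lcm(*periodos)
--     mdc = math.gcd(*periodos)
--     tamanho_frame = max(maiores_tempos_execucao)
--     falta = 2 * tamanho_frame - mmc
--     tempo_ciclo_secundario = mdc * max(1, -((-falta) // mdc))
--     return mmc, tempo_ciclo_secundario
-- ===== Notes on version B (the rewrite author's own statement) =====
-- stated objective: simpler
-- what changed: The secondary-cycle while loop (sec += mdc until 2*frame - mmc <= sec) is replaced by one closed-form ceiling division sec = mdc*max(1, ceil((2*frame-mmc)/mdc)), and the hand-rolled gcd/lcm helpers by math.lcm/math.gcd over the whole list.
-- intended difference: On a single-period list [p] with p < 0 and no positive execution time, A returns p itself (negative) as the secondary cycle time because its mdc is seeded with the raw periodos[0]; B returns the positive gcd -p, the intended cycle length. — e.g. on calcular_tempo_ciclo_primario_e_secundario([-5], [-4]): A returns [5, -5], B returns [5, 5]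
-- outside the precondition, e.g. on calcular_tempo_ciclo_primario_e_secundario([0], [-1]): A returns (0, 0), B raises ZeroDivisionError
import Mathlib
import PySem

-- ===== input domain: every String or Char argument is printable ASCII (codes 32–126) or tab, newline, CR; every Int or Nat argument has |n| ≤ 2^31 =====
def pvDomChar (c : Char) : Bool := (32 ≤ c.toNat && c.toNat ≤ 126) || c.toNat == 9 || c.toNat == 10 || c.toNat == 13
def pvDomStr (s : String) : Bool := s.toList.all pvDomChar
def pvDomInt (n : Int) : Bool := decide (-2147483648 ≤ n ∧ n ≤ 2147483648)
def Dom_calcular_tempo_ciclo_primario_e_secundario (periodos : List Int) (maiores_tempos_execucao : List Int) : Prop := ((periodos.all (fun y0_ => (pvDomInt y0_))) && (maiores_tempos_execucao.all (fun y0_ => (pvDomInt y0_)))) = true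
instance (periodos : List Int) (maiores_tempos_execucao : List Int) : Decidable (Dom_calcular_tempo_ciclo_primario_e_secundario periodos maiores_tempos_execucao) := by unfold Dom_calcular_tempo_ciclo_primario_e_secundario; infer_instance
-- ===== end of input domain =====

-- B replaces A's incremental "sec += mdc" search by one closed-form ceiling division and the
-- hand-rolled gcd/lcm chain by library gcd/lcm of the whole list (simpler: no value-dependent loop).


-- ===== PORT A =====
-- the inner 'def gcd' of calcular_mmc: while b: a, b = b, a % b.
-- The fuel argument only makes the loop total; |a % b| < |b| so fuel |b|+1 is never exhausted.
def pvGcdGo : Nat → Int → Int → Int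
  | 0, a, _ => a
  | f + 1, a, b => if b = 0 then a else pvGcdGo f b (PySem.Int.mod a b)

def pvGcdA (a b : Int) : Int := pvGcdGo (b.natAbs + 1) a b

-- the inner 'def lcm': a * b // gcd(a, b)  (Python raises ZeroDivisionError when gcd = 0; Pre_ excludes)
def pvLcmA (a b : Int) : Int := PySem.Int.floordiv (a * b) (pvGcdA a b)

-- calcular_mmc: mmc = 1; for periodo in periodos: mmc = lcm(mmc, periodo)
def pvMmcA (periodos : List Int) : Int := periodos.foldl (fun mmc p => pvLcmA mmc p) 1

-- calcular_mdc: mdc = periodos[0]; for periodo in periodos[1:]: mdc = math.gcd(mdc, periodo)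
-- (Python raises IndexError on []; Pre_ excludes, the [] branch value is never claimed)
def pvMdcA (periodos : List Int) : Int :=
  match periodos with
  | [] => 0
  | h :: t => t.foldl (fun mdc p => (Int.gcd mdc p : Int)) h

-- while (2*tamanho_frame - tempo_ciclo_primario) > sec: sec += mdc.
-- The fuel only makes the loop total: when 0 < mdc it is never exhausted; when mdc ≤ 0 and the
-- condition holds Python loops forever (Pre_ excludes exactly those inputs).
def pvSecGo : Nat → Int → Int → Int → Int
  | 0, _, _, sec => sec
  | f + 1, falta, mdc, sec => if falta > sec then pvSecGo f falta mdc (sec + mdc) else sec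

def pvSecLoopA (falta mdc sec : Int) : Int := pvSecGo ((falta - sec).toNat + 1) falta mdc sec

def calcular_tempo_ciclo_primario_e_secundario (periodos : List Int) (maiores_tempos_execucao : List Int) : List Int :=
  let mmc := pvMmcA periodos
  let mdc := pvMdcA periodos
  let tamanho_frame := (PySem.List.max? maiores_tempos_execucao (fun m => m)).getD 0  -- max(...): raises on []; Pre_ excludes
  let tempo_ciclo_primario := mmc
  let tempo_ciclo_secundario := pvSecLoopA (2 * tamanho_frame - tempo_ciclo_primario) mdc mdc
  [tempo_ciclo_primario, tempo_ciclo_secundario]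

-- ===== PORT B =====
def pvLcmI (a b : Int) : Int := (Int.lcm a b : Int)   -- math.lcm step
def pvGcdI (a b : Int) : Int := (Int.gcd a b : Int)   -- math.gcd step

def calcular_tempo_ciclo_primario_e_secundario_alt (periodos : List Int) (maiores_tempos_execucao : List Int) : List Int :=
  let mmc := periodos.foldl pvLcmI 1        -- math.lcm(*periodos)
  let mdc := periodos.foldl pvGcdI 0        -- math.gcd(*periodos)
  let tamanho_frame := (PySem.List.max? maiores_tempos_execucao (fun m => m)).getD 0
  let falta := 2 * tamanho_frame - mmc
  let tempo_ciclo_secundario := mdc * max 1 (-(PySem.Int.floordiv (-falta) mdc))  -- mdc * max(1, ceil(falta/mdc))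
  [mmc, tempo_ciclo_secundario]

-- ===== PRECONDITION & SPEC =====
-- Pre_ excludes: empty lists (A raises IndexError/ValueError), lists with two or more zero periods
-- (A raises ZeroDivisionError in its lcm), a singleton zero period (A diverges, or returns (0, 0)
-- while B itself raises ZeroDivisionError), and a singleton negative period together with a
-- positive execution time (A's while loop diverges).
def Pre_calcular_tempo_ciclo_primario_e_secundario (periodos : List Int) (maiores_tempos_execucao : List Int) : Prop :=
  periodos ≠ [] ∧ maiores_tempos_execucao ≠ [] ∧ periodos.count 0 ≤ 1 ∧
    (periodos.length = 1 → periodos.headD 0 ≠ 0 ∧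
      (periodos.headD 0 < 0 → ∀ m ∈ maiores_tempos_execucao, m ≤ 0))
instance (periodos : List Int) (maiores_tempos_execucao : List Int) : Decidable (Pre_calcular_tempo_ciclo_primario_e_secundario periodos maiores_tempos_execucao) := by unfold Pre_calcular_tempo_ciclo_primario_e_secundario; infer_instance

def pvWitness_calcular_tempo_ciclo_primario_e_secundario : List Int × List Int := ([2, 3], [4])

-- On a single-period list [p] with p < 0 and no positive execution time, A returns p itself
-- (negative) as the secondary cycle time because its mdc is seeded with the raw periodos[0];
-- B returns the positive gcd -p, the intended cycle length.
def D_calcular_tempo_ciclo_primario_e_secundario (periodos : List Int) (maiores_tempos_execucao : List Int) : Prop :=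
  periodos.length = 1 ∧ periodos.headD 0 < 0 ∧ maiores_tempos_execucao ≠ [] ∧
    ∀ m ∈ maiores_tempos_execucao, m ≤ 0
instance (periodos : List Int) (maiores_tempos_execucao : List Int) : Decidable (D_calcular_tempo_ciclo_primario_e_secundario periodos maiores_tempos_execucao) := by unfold D_calcular_tempo_ciclo_primario_e_secundario; infer_instance

def Spec_calcular_tempo_ciclo_primario_e_secundario (periodos : List Int) (maiores_tempos_execucao : List Int) (out : List Int) : Prop := ¬ D_calcular_tempo_ciclo_primario_e_secundario periodos maiores_tempos_execucao → out = calcular_tempo_ciclo_primario_e_secundario_alt periodos maiores_tempos_execucao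
instance (periodos : List Int) (maiores_tempos_execucao : List Int) (out : List Int) : Decidable (Spec_calcular_tempo_ciclo_primario_e_secundario periodos maiores_tempos_execucao out) := by unfold Spec_calcular_tempo_ciclo_primario_e_secundario; infer_instance

def pvDiffWitness_calcular_tempo_ciclo_primario_e_secundario : List Int × List Int := ([-5], [-4])
def pvDiffWitnessOut_calcular_tempo_ciclo_primario_e_secundario : (List Int) × (List Int) := ([5, -5], [5, 5])

-- ===== CLAIM (what is proved, stated in full; the proofs are below) =====
def Claim_unchanged_calcular_tempo_ciclo_primario_e_secundario : Prop := ∀ (periodos : List Int) (maiores_tempos_execucao : List Int), Dom_calcular_tempo_ciclo_primario_e_secundario periodos maiores_tempos_execucao → Pre_calcular_tempo_ciclo_primario_e_secundario periodos maiores_tempos_execucao → Spec_calcular_tempo_ciclo_primario_e_secundario periodos maiores_tempos_execucao (calcular_tempo_ciclo_primario_e_secundario periodos maiores_tempos_execucao)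
def Claim_changed_calcular_tempo_ciclo_primario_e_secundario : Prop := Dom_calcular_tempo_ciclo_primario_e_secundario (pvDiffWitness_calcular_tempo_ciclo_primario_e_secundario.1) (pvDiffWitness_calcular_tempo_ciclo_primario_e_secundario.2) ∧ Pre_calcular_tempo_ciclo_primario_e_secundario (pvDiffWitness_calcular_tempo_ciclo_primario_e_secundario.1) (pvDiffWitness_calcular_tempo_ciclo_primario_e_secundario.2) ∧ D_calcular_tempo_ciclo_primario_e_secundario (pvDiffWitness_calcular_tempo_ciclo_primario_e_secundario.1) (pvDiffWitness_calcular_tempo_ciclo_primario_e_secundario.2) ∧ calcular_tempo_ciclo_primario_e_secundario (pvDiffWitness_calcular_tempo_ciclo_primario_e_secundario.1) (pvDiffWitness_calcular_tempo_ciclo_primario_e_secundario.2) = pvDiffWitnessOut_calcular_tempo_ciclo_primario_e_secundario.1 ∧ calcular_tempo_ciclo_primario_e_secundario_alt (pvDiffWitness_calcular_tempo_ciclo_primario_e_secundario.1) (pvDiffWitness_calcular_tempo_ciclo_primario_e_secundario.2) = pvDiffWitnessOut_calcular_tempo_ciclo_primario_e_secundario.2 ∧ pvDiffWitnessOut_calcular_tempo_ciclo_primario_e_secundario.1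 ≠ pvDiffWitnessOut_calcular_tempo_ciclo_primario_e_secundario.2
def Claim_exact_calcular_tempo_ciclo_primario_e_secundario : Prop := ∀ (periodos : List Int) (maiores_tempos_execucao : List Int), Dom_calcular_tempo_ciclo_primario_e_secundario periodos maiores_tempos_execucao → Pre_calcular_tempo_ciclo_primario_e_secundario periodos maiores_tempos_execucao → D_calcular_tempo_ciclo_primario_e_secundario periodos maiores_tempos_execucao → calcular_tempo_ciclo_primario_e_secundario periodos maiores_tempos_execucao ≠ calcular_tempo_ciclo_primario_e_secundario_alt periodos maiores_tempos_execucao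

-- ===== LEMMAS AND PROOFS =====

-- Python's a % b is congruent to a modulo b, so gcd is preserved
theorem pvGcdModStep (a b : Int) : Int.gcd b (PySem.Int.mod a b) = Int.gcd a b := by
  have h := PySem.Int.floordiv_mul_add_mod a b
  have : PySem.Int.mod a b = a + b * (-(PySem.Int.floordiv a b)) := by linarith
  rw [this, Int.gcd_add_mul_left_right, Int.gcd_comm]

theorem pvGcdGoNonneg : ∀ (f : Nat) (a b : Int), 0 ≤ a → 0 ≤ b → b.natAbs < f →
    pvGcdGo f a b = Int.gcd a b := by
  intro f
  induction f with
  | zero => intro a b _ _ h; omega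
  | succ f ih =>
    intro a b ha hb hf
    rw [pvGcdGo]
    by_cases h0 : b = 0
    · simp [h0, Int.natAbs_of_nonneg ha]
    · have hbpos : 0 < b := lt_of_le_of_ne hb (Ne.symm h0)
      have h1 := PySem.Int.mod_nonneg a hbpos
      have h2 := PySem.Int.mod_lt a hbpos
      rw [if_neg h0, ih b _ hb h1 (by omega), pvGcdModStep]

theorem pvGcdGoNonpos : ∀ (f : Nat) (a b : Int), a ≤ 0 → b ≤ 0 → b.natAbs < f →
    pvGcdGo f a b = -(Int.gcd a b) := by
  intro f
  induction f with
  | zero => intro a b _ _ h; omega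
  | succ f ih =>
    intro a b ha hb hf
    rw [pvGcdGo]
    by_cases h0 : b = 0
    · subst h0
      rw [if_pos rfl, Int.gcd_zero_right]
      omega
    · have hbneg : b < 0 := lt_of_le_of_ne hb h0
      have h1 := PySem.Int.mod_neg_bounds a hbneg
      rw [if_neg h0, ih b _ hb h1.2 (by omega), pvGcdModStep]

theorem pvGcdAPosRight (a b : Int) (hb : 0 < b) : pvGcdA a b = Int.gcd a b := by
  have h1 := PySem.Int.mod_nonneg a hb
  have h2 := PySem.Int.mod_lt a hb
  rw [pvGcdA, pvGcdGo, if_neg (by omega),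
    pvGcdGoNonneg b.natAbs b _ (le_of_lt hb) h1 (by omega), pvGcdModStep]

theorem pvGcdANegRight (a b : Int) (hb : b < 0) : pvGcdA a b = -(Int.gcd a b) := by
  have h1 := PySem.Int.mod_neg_bounds a hb
  rw [pvGcdA, pvGcdGo, if_neg (by omega),
    pvGcdGoNonpos b.natAbs b _ (le_of_lt hb) h1.2 (by omega), pvGcdModStep]

-- exact floor division: (d * k) // d = k for d ≠ 0
theorem pvFloordivMulCancel (d k : Int) (hd : d ≠ 0) : PySem.Int.floordiv (d * k) d = k := by
  have h := PySem.Int.floordiv_mul_add_mod (d * k) d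
  have hz : PySem.Int.mod (d * k) d = 0 :=
    (PySem.Int.mod_eq_zero_iff_dvd (d * k) d).2 ⟨k, rfl⟩
  rw [hz, add_zero] at h
  have : (PySem.Int.floordiv (d * k) d) * d = k * d := by linarith [h]
  exact mul_right_cancel₀ hd this

theorem pvLcmAEq (a b : Int) (ha : 0 ≤ a) (h : ¬(a = 0 ∧ b = 0)) : pvLcmA a b = pvLcmI a b := by
  have hkey : a * b = pvGcdA a b * (Int.lcm a b : Int) ∧ pvGcdA a b ≠ 0 := by
    rcases lt_trichotomy b 0 with hb | hb | hb
    · have hg := pvGcdANegRight a b hb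
      have hmul : (Int.gcd a b : Int) * (Int.lcm a b : Int) = ((a.natAbs * b.natAbs : Nat) : Int) := by
        exact_mod_cast Int.gcd_mul_lcm a b
      have ha' : (a.natAbs : Int) = a := by omega
      have hb' : (b.natAbs : Int) = -b := by omega
      have habs : ((a.natAbs * b.natAbs : Nat) : Int) = -(a * b) := by
        rw [Nat.cast_mul, ha', hb']
        ring
      have hgne : (Int.gcd a b : Int) ≠ 0 := by
        have h1 : b.natAbs ≠ 0 := by omega
        have h2 : Int.gcd a b ≠ 0 := fun hc => h1 (Nat.eq_zero_of_gcd_eq_zero_right hc)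
        exact_mod_cast h2
      constructor
      · rw [hg, neg_mul, hmul, habs, neg_neg]
      · rw [hg]
        exact neg_ne_zero.2 hgne
    · subst hb
      have ha' : a ≠ 0 := fun hc => h ⟨hc, rfl⟩
      have hg : pvGcdA a 0 = a := by simp [pvGcdA, pvGcdGo]
      exact ⟨by simp [hg], by rw [hg]; exact ha'⟩
    · have hg := pvGcdAPosRight a b hb
      have hmul : (Int.gcd a b : Int) * (Int.lcm a b : Int) = ((a.natAbs * b.natAbs : Nat) : Int) := by
        exact_mod_cast Int.gcd_mul_lcm a b
      have ha' : (a.natAbs : Int) = a := by omega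
      have hb' : (b.natAbs : Int) = b := by omega
      have habs : ((a.natAbs * b.natAbs : Nat) : Int) = a * b := by
        rw [Nat.cast_mul, ha', hb']
      have hgne : (Int.gcd a b : Int) ≠ 0 := by
        have h1 : b.natAbs ≠ 0 := by omega
        have h2 : Int.gcd a b ≠ 0 := fun hc => h1 (Nat.eq_zero_of_gcd_eq_zero_right hc)
        exact_mod_cast h2
      exact ⟨by rw [hg, hmul, habs], by rw [hg]; exact hgne⟩
  rw [pvLcmA, pvLcmI, hkey.1, pvFloordivMulCancel _ _ hkey.2]

-- A's lcm fold equals math.lcm's fold, as long as at most one zero occurs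
theorem pvMmcFold : ∀ (ps : List Int) (acc : Int), 0 ≤ acc → (acc = 0 → (0 : Int) ∉ ps) →
    ps.count 0 ≤ 1 → ps.foldl (fun mmc p => pvLcmA mmc p) acc = ps.foldl pvLcmI acc := by
  intro ps
  induction ps with
  | nil => intro acc _ _ _; rfl
  | cons p t ih =>
    intro acc hacc hnz hcnt
    have hstep : pvLcmA acc p = pvLcmI acc p := by
      apply pvLcmAEq acc p hacc
      rintro ⟨h1, h2⟩
      exact hnz h1 (by simp [h2])
    have hcnt' : t.count 0 ≤ 1 := by
      rw [List.count_cons] at hcnt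
      split at hcnt <;> omega
    have hnz' : pvLcmI acc p = 0 → (0 : Int) ∉ t := by
      intro h0
      have : acc = 0 ∨ p = 0 := by
        have : Int.lcm acc p = 0 := by simpa [pvLcmI] using h0
        rcases Int.lcm_eq_zero_iff.1 this with h | h
        · exact Or.inl h
        · exact Or.inr h
      rcases this with h | h
      · intro hm; exact hnz h (by simp [hm])
      · subst h
        rw [List.count_cons] at hcnt
        simp at hcnt
        exact List.count_eq_zero.1 (by omega)
    simp only [List.foldl_cons]
    rw [hstep]
    exact ih (pvLcmI acc p) (by simp [pvLcmI]) hnz' hcnt'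

-- gcd folds only depend on |seed|
theorem pvGcdFoldAbs : ∀ (t : List Int) (a : Int), t ≠ [] →
    t.foldl pvGcdI a = t.foldl pvGcdI (a.natAbs : Int) := by
  intro t a ht
  cases t with
  | nil => exact absurd rfl ht
  | cons x t' =>
    simp only [List.foldl_cons]
    have : pvGcdI (a.natAbs : Int) x = pvGcdI a x := by
      simp [pvGcdI, Int.gcd, Int.natAbs_abs]
    rw [this]

theorem pvGcdFoldZeroIff : ∀ (t : List Int) (a : Int),
    (t.foldl pvGcdI a = 0 ↔ a = 0 ∧ ∀ p ∈ t, p = 0) := by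
  intro t
  induction t with
  | nil => simp
  | cons x t' ih =>
    intro a
    simp only [List.foldl_cons, ih, List.mem_cons]
    constructor
    · rintro ⟨h1, h2⟩
      have hg : Int.gcd a x = 0 := by simpa [pvGcdI] using h1
      have ha0 : a = 0 := Int.natAbs_eq_zero.1 (Nat.eq_zero_of_gcd_eq_zero_left hg)
      have hx0 : x = 0 := Int.natAbs_eq_zero.1 (Nat.eq_zero_of_gcd_eq_zero_right hg)
      refine ⟨ha0, fun p hp => ?_⟩
      rcases hp with h | h
      · rw [h, hx0]
      · exact h2 p h
    · rintro ⟨h1, h2⟩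
      exact ⟨by simp [pvGcdI, h1, h2 x (Or.inl rfl)], fun p hp => h2 p (Or.inr hp)⟩

theorem pvGcdFoldNonneg : ∀ (t : List Int) (a : Int), 0 ≤ a → 0 ≤ t.foldl pvGcdI a := by
  intro t
  induction t with
  | nil => intro a ha; simpa
  | cons x t' ih =>
    intro a _
    simp only [List.foldl_cons]
    exact ih _ (by simp [pvGcdI])

-- closed form of the while loop, given positive step
theorem pvSecGoClosed : ∀ (f : Nat) (falta mdc sec : Int), 0 < mdc → (falta - sec).toNat < f →
    pvSecGo f falta mdc sec = sec + mdc * max 0 (-((sec - falta) / mdc)) := by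
  intro f
  induction f with
  | zero => intro falta mdc sec _ h; omega
  | succ f ih =>
    intro falta mdc sec hm hf
    rw [pvSecGo]
    by_cases hc : falta > sec
    · rw [if_pos hc, ih falta mdc (sec + mdc) hm (by omega)]
      have hdiv : (sec + mdc - falta) / mdc = (sec - falta) / mdc + 1 := by
        rw [show sec + mdc - falta = sec - falta + 1 * mdc by ring,
          Int.add_mul_ediv_right _ _ (ne_of_gt hm)]
      have hneg : (sec - falta) / mdc < 0 := Int.ediv_neg_of_neg_of_pos (by omega) hm
      rw [hdiv]
      have h1 : max 0 (-((sec - falta) / mdc + 1)) = -((sec - falta) / mdc) - 1 := by omega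
      have h2 : max 0 (-((sec - falta) / mdc)) = -((sec - falta) / mdc) := by omega
      rw [h1, h2]
      ring
    · rw [if_neg hc]
      have : 0 ≤ (sec - falta) / mdc := Int.ediv_nonneg (by omega) (le_of_lt hm)
      have : max 0 (-((sec - falta) / mdc)) = 0 := by omega
      rw [this]
      ring

-- the two secondary-cycle computations agree for positive mdc
theorem pvSecBridge (falta mdc : Int) (hm : 0 < mdc) :
    pvSecLoopA falta mdc mdc = mdc * max 1 (-(PySem.Int.floordiv (-falta) mdc)) := by
  rw [pvSecLoopA, pvSecGoClosed _ falta mdc mdc hm (by omega),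
    PySem.Int.floordiv_eq_ediv_of_pos hm]
  have hdiv : (mdc - falta) / mdc = (-falta) / mdc + 1 := by
    rw [show mdc - falta = -falta + 1 * mdc by ring, Int.add_mul_ediv_right _ _ (ne_of_gt hm)]
  rw [hdiv]
  set q : Int := (-falta) / mdc with hq
  by_cases h1 : 1 ≤ -q
  · have e1 : max 0 (-(q + 1)) = -q - 1 := by omega
    have e2 : max 1 (-q) = -q := by omega
    rw [e1, e2]; ring
  · have e1 : max 0 (-(q + 1)) = 0 := by omega
    have e2 : max 1 (-q) = 1 := by omega
    rw [e1, e2]; ring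

-- ===== VERDICT (by name: the statement is the Claim_ definition above) =====
theorem calcular_tempo_ciclo_primario_e_secundario_spec : Claim_unchanged_calcular_tempo_ciclo_primario_e_secundario := by
  intro ps ms _ hpre hnd
  obtain ⟨hps, hms, hcnt, hone⟩ := hpre
  cases ps with
  | nil => exact absurd rfl hps
  | cons h t =>
    -- mmc agreement
    have hmmc : pvMmcA (h :: t) = (h :: t).foldl pvLcmI 1 :=
      pvMmcFold (h :: t) 1 (by omega) (by omega) hcnt
    -- mdc agreement
    have hmdc : pvMdcA (h :: t) = (h :: t).foldl pvGcdI 0 := by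
      cases t with
      | nil =>
        have hh : 0 < h := by
          have h1 := (hone rfl).1
          rcases lt_trichotomy h 0 with hneg | hzero | hp
          · have hall := (hone rfl).2 (by simpa using hneg)
            exact absurd ⟨rfl, by simpa using hneg, hms, hall⟩ hnd
          · exact absurd (by simpa using hzero) h1
          · exact hp
        simp [pvMdcA, pvGcdI, Int.gcd, Int.natAbs_of_nonneg (le_of_lt hh)]
      | cons x t' =>
        show (x :: t').foldl pvGcdI h = (h :: x :: t').foldl pvGcdI 0
        have e0 : (h :: x :: t').foldl pvGcdI 0 = (x :: t').foldl pvGcdI (pvGcdI 0 h) := rfl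
        have e1 : pvGcdI 0 h = (h.natAbs : Int) := by simp [pvGcdI]
        rw [e0, e1, pvGcdFoldAbs (x :: t') h (by simp)]
    -- mdc positivity
    have hpos : 0 < (h :: t).foldl pvGcdI 0 := by
      have hnz : ¬(h :: t).foldl pvGcdI 0 = 0 := by
        rw [pvGcdFoldZeroIff]
        rintro ⟨_, hall⟩
        cases t with
        | nil =>
          exact (hone rfl).1 (hall h (by simp))
        | cons x t' =>
          have hh0 : h = 0 := hall h (by simp)
          have hx0 : x = 0 := hall x (by simp)
          have h2 : List.count 0 (h :: x :: t') = List.count 0 t' + 2 := by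
            rw [hh0, hx0]
            simp
          omega
      have := pvGcdFoldNonneg (h :: t) 0 (le_refl 0)
      omega
    -- assemble
    show _ = calcular_tempo_ciclo_primario_e_secundario_alt (h :: t) ms
    unfold calcular_tempo_ciclo_primario_e_secundario calcular_tempo_ciclo_primario_e_secundario_alt
    simp only []
    rw [hmmc, hmdc, pvSecBridge _ _ hpos]

theorem calcular_tempo_ciclo_primario_e_secundario_changed : Claim_changed_calcular_tempo_ciclo_primario_e_secundario := by
  unfold Claim_changed_calcular_tempo_ciclo_primario_e_secundario
  decide

theorem calcular_tempo_ciclo_primario_e_secundario_tight : Claim_exact_calcular_tempo_ciclo_primario_e_secundario := by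
  intro ps ms _ hpre hd
  obtain ⟨hlen, hneg, hms, hall⟩ := hd
  cases ps with
  | nil => simp at hlen
  | cons h t =>
    cases t with
    | cons _ _ => simp at hlen
    | nil =>
      have hh : h < 0 := by simpa using hneg
      -- the frame (max of ms) is nonpositive
      obtain ⟨m, hm⟩ : ∃ m, PySem.List.max? ms (fun x => x) = some m := by
        cases hms' : PySem.List.max? ms (fun x => x) with
        | none => exact absurd ((PySem.List.max?_eq_none_iff ms (fun x => x)).1 hms') hms
        | some m => exact ⟨m, rfl⟩
      have hmem : m ∈ ms := PySem.List.max?_mem hm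
      have hm0 : m ≤ 0 := hall m hmem
      -- A's secondary cycle is h itself (< 0): the loop body never runs
      have hAsec : ∀ falta : Int, ¬ falta > h → pvSecLoopA falta h h = h := by
        intro falta hc
        rw [pvSecLoopA, pvSecGo, if_neg hc]
      -- A's mmc on [h] is -h
      have hgcd : pvGcdA 1 h = -1 := by
        rw [pvGcdANegRight 1 h hh]
        simp
      have hmmcA : pvMmcA [h] = -h := by
        show pvLcmA 1 h = -h
        rw [pvLcmA, hgcd, show (1 : Int) * h = (-1) * (-h) by ring,
          pvFloordivMulCancel _ _ (by omega)]
      intro heq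
      -- compare second components
      have hA : calcular_tempo_ciclo_primario_e_secundario [h] ms
          = [-h, h] := by
        unfold calcular_tempo_ciclo_primario_e_secundario
        simp only [hm, pvMdcA, hmmcA, Option.getD_some, List.foldl_nil]
        rw [hAsec (2 * m - -h) (by omega)]
      -- B's secondary cycle is positive
      have hBmdc : [h].foldl pvGcdI 0 = -h := by
        show ((Int.gcd 0 h : Nat) : Int) = -h
        rw [Int.gcd_zero_left]
        omega
      have hB : calcular_tempo_ciclo_primario_e_secundario_alt [h] ms
          = [[h].foldl pvLcmI 1, (-h) * max 1 (-(PySem.Int.floordiv (-(2 * m - [h].foldl pvLcmI 1)) (-h)))] := by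
        unfold calcular_tempo_ciclo_primario_e_secundario_alt
        simp only [hm, Option.getD_some, hBmdc]
      rw [hA, hB] at heq
      simp only [List.cons.injEq, and_true] at heq
      obtain ⟨-, h3⟩ := heq
      -- h < 0 but B's value is ≥ -h > 0
      have hmax : (1 : Int) ≤ max 1 (-(PySem.Int.floordiv (-(2 * m - [h].foldl pvLcmI 1)) (-h))) :=
        le_max_left _ _
      nlinarith [h3, hmax, hh]
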